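-- pv_equiv track=rewrite | github.com/Iluminatto1970/voxen | voxen.py | _normalize_direct_input
-- ===== SOURCE A (Python) =====
-- INTERACTIVE_COMMAND_PREFIX = "__VOXEN_INTERACTIVE_COMMAND__::"
--
-- def _normalize_direct_input(tokens: list[str], raw: str = "") -> str:
--     text = (raw or "").strip()
--     if text:
--         lowered = text.lower()
--         interactive_aliases = {
--             "/voxen-plan": "/voxen plan",
--             "voxen-plan": "/voxen plan",
--             "/voxen-brainstorm": "/voxen brainstorm",
--             "voxen-brainstorm": "/voxen brainstorm",
--             "/voxen-create": "/voxen create",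
--             "voxen-create": "/voxen create",
--             "/voxen-debug": "/voxen debug",
--             "voxen-debug": "/voxen debug",
--             "/voxen-enhance": "/voxen enhance",
--             "voxen-enhance": "/voxen enhance",
--             "/voxen-preview": "/voxen preview",
--             "voxen-preview": "/voxen preview",
--             "/voxen-orchestrate": "/voxen orchestrate",
--             "voxen-orchestrate": "/voxen orchestrate",
--             "/voxen-test": "/voxen test",
--             "voxen-test": "/voxen test",
--             "/voxen-deploy": "/voxen deploy",
--             "voxen-deploy": "/voxen deploy",
--             "/voxen-status": "/voxen status",
--             "voxen-status": "/voxen status",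
--             "/voxen-ui-ux-pro-max": "/voxen ui-ux-pro-max",
--             "voxen-ui-ux-pro-max": "/voxen ui-ux-pro-max",
--             "/voxen-discovery-to-delivery": "/voxen discovery-to-delivery",
--             "voxen-discovery-to-delivery": "/voxen discovery-to-delivery",
--         }
--         if lowered in interactive_aliases:
--             target = interactive_aliases[lowered]
--             return f"{INTERACTIVE_COMMAND_PREFIX}{target}"
--         for alias, target in interactive_aliases.items():
--             prefix = f"{alias} "
--             if lowered.startswith(prefix):
--                 suffix = text[len(prefix):].strip()
--                 full_target = f"{target} {suffix}".strip()
--                 return f"{INTERACTIVE_COMMAND_PREFIX}{full_target}"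
--         if text.startswith("/voxen ") or text == "/voxen":
--             return text
--         if text.startswith("/"):
--             return f"/voxen {text[1:]}"
--         parts = text.split(None, 1)
--         if parts and parts[0].lower() in {
--             "plan",
--             "brainstorm",
--             "create",
--             "debug",
--             "enhance",
--             "preview",
--             "orchestrate",
--             "test",
--             "deploy",
--             "ui-ux-pro-max",
--             "discovery-to-delivery",
--             "workflow",
--             "status",
--             "skills",
--             "list",
--             "context",
--             "route",
--             "workflows",
--             "specialists",
--             "bundle",
--             "eval",
--             "profiles",
--         }:
--             return f"/voxen {text}"
--         return text
--
--     joined = " ".join(tokens).strip()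
--     if not joined:
--         return ""
--     return _normalize_direct_input([], joined)
-- ===== SOURCE B (Python) =====
-- INTERACTIVE_COMMAND_PREFIX = "__VOXEN_INTERACTIVE_COMMAND__::"
--
-- _SUBCOMMANDS = [
--     "plan", "brainstorm", "create", "debug", "enhance", "preview",
--     "orchestrate", "test", "deploy", "status", "ui-ux-pro-max",
--     "discovery-to-delivery",
-- ]
--
-- _ALIASES = {}
-- for _name in _SUBCOMMANDS:
--     _full = "/voxen " + _name
--     _ALIASES["/voxen-" + _name] = _full
--     _ALIASES["voxen-" + _name] = _full
--
-- _KNOWN = set(_SUBCOMMANDS + [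
--     "workflow", "skills", "list", "context", "route", "workflows",
--     "specialists", "bundle", "eval", "profiles",
-- ])
--
--
-- def _norm(text: str) -> str:
--     head, _sep, rest = text.partition(" ")
--     target = _ALIASES.get(head.lower())
--     if target is not None:
--         suffix = rest.strip()
--         return INTERACTIVE_COMMAND_PREFIX + f"{target} {suffix}".strip()
--     if text.startswith("/voxen ") or text == "/voxen":
--         return text
--     if text.startswith("/"):
--         return "/voxen " + text[1:]
--     words = text.split(None, 1)
--     if words and words[0].lower() in _KNOWN:
--         return "/voxen " + text
--     return text
--
--
-- def _normalize_direct_input(tokens: list[str], raw: str = "") -> str: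
--     text = (raw or "").strip()
--     if text:
--         return _norm(text)
--     joined = " ".join(tokens).strip()
--     return _norm(joined) if joined else ""
-- ===== Notes on version B (the rewrite author's own statement) =====
-- stated objective: simpler
-- what changed: B replaces A's separate exact-match dict test plus 24-iteration startswith loop by one partition of the text on its first space followed by a single keyed lookup in an alias dict that is itself built from the 12 subcommand names instead of being written out as 24 literal entries; the top level uses a _norm helper instead of A's self-recursion.
import Mathlib
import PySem

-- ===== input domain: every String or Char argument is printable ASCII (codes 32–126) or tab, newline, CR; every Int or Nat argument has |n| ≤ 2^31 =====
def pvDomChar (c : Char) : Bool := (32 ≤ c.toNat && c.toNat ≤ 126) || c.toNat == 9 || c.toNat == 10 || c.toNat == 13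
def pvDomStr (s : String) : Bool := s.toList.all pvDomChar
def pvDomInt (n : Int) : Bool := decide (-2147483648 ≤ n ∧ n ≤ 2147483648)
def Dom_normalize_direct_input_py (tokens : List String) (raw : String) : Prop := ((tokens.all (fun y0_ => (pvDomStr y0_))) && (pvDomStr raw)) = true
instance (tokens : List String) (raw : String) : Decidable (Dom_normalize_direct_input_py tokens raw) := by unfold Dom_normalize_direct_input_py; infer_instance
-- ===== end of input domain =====

-- B replaces A's exact-match test plus 24-iteration `startswith` scan by one partition on the
-- first space and a single keyed lookup in an alias dict built from the 12 subcommand names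
-- (objective: simpler; same observable behaviour).

-- Python's strip is idempotent; the A-port's recursion terminates by this fact (cited in decreasing_by).
-- head-preservation of Python's rstrip: if t does not start with whitespace, neither does t.rstrip()
theorem pvDropWhile_rstrip (p : Char → Bool) (t : List Char) (ht : List.dropWhile p t = t) :
    List.dropWhile p (List.dropWhile p t.reverse).reverse = (List.dropWhile p t.reverse).reverse := by
  rcases ht2 : (List.dropWhile p t.reverse).reverse with _ | ⟨x, xs⟩
  · simp
  · have hpre : (List.dropWhile p t.reverse).reverse <+: t := by
      have := (List.dropWhile_suffix (l := t.reverse) p).reverse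
      simpa using this
    rw [ht2] at hpre
    have ht0 : t ≠ [] := by
      rintro rfl; simp at ht2
    have hhead : t.head? = some x := by
      rcases hpre with ⟨u, hu⟩
      rw [← hu]; simp
    rw [List.dropWhile_cons, if_neg]
    intro hpx
    rcases t with _ | ⟨y, ys⟩
    · simp at ht0
    · simp at hhead
      subst hhead
      rw [List.dropWhile_cons, if_pos hpx] at ht
      have hlen := congrArg List.length ht
      simp at hlen
      have := List.length_dropWhile_le p ys
      omega

theorem pvStrip_strip (s : List Char) : PySem.Chars.strip (PySem.Chars.strip s) = PySem.Chars.strip s := by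
  have h1 : PySem.Chars.lstrip (PySem.Chars.lstrip s) = PySem.Chars.lstrip s := List.dropWhile_idempotent _ _
  have h2 : PySem.Chars.lstrip (PySem.Chars.rstrip (PySem.Chars.lstrip s)) = PySem.Chars.rstrip (PySem.Chars.lstrip s) := pvDropWhile_rstrip _ _ h1
  have h3 : PySem.Chars.rstrip (PySem.Chars.rstrip (PySem.Chars.lstrip s)) = PySem.Chars.rstrip (PySem.Chars.lstrip s) := by
    show (List.dropWhile _ (List.dropWhile _ (PySem.Chars.lstrip s).reverse).reverse.reverse).reverse = _
    rw [List.reverse_reverse, List.dropWhile_idempotent]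
    rfl
  show PySem.Chars.rstrip (PySem.Chars.lstrip (PySem.Chars.rstrip (PySem.Chars.lstrip s))) = PySem.Chars.rstrip (PySem.Chars.lstrip s)
  rw [h2, h3]

-- ===== PORT A =====
-- INTERACTIVE_COMMAND_PREFIX (module constant, shared by both Pythons)
def pvCmdPrefix : List Char := "__VOXEN_INTERACTIVE_COMMAND__::".toList

-- A's literal `interactive_aliases` dict
def voxenAliasesA : PySem.Dict (List Char) (List Char) := PySem.Dict.mk [
  ("/voxen-plan".toList, "/voxen plan".toList), ("voxen-plan".toList, "/voxen plan".toList),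
  ("/voxen-brainstorm".toList, "/voxen brainstorm".toList), ("voxen-brainstorm".toList, "/voxen brainstorm".toList),
  ("/voxen-create".toList, "/voxen create".toList), ("voxen-create".toList, "/voxen create".toList),
  ("/voxen-debug".toList, "/voxen debug".toList), ("voxen-debug".toList, "/voxen debug".toList),
  ("/voxen-enhance".toList, "/voxen enhance".toList), ("voxen-enhance".toList, "/voxen enhance".toList),
  ("/voxen-preview".toList, "/voxen preview".toList), ("voxen-preview".toList, "/voxen preview".toList),
  ("/voxen-orchestrate".toList, "/voxen orchestrate".toList), ("voxen-orchestrate".toList, "/voxen orchestrate".toList),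
  ("/voxen-test".toList, "/voxen test".toList), ("voxen-test".toList, "/voxen test".toList),
  ("/voxen-deploy".toList, "/voxen deploy".toList), ("voxen-deploy".toList, "/voxen deploy".toList),
  ("/voxen-status".toList, "/voxen status".toList), ("voxen-status".toList, "/voxen status".toList),
  ("/voxen-ui-ux-pro-max".toList, "/voxen ui-ux-pro-max".toList), ("voxen-ui-ux-pro-max".toList, "/voxen ui-ux-pro-max".toList),
  ("/voxen-discovery-to-delivery".toList, "/voxen discovery-to-delivery".toList), ("voxen-discovery-to-delivery".toList, "/voxen discovery-to-delivery".toList)]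

-- A's `for alias, target in interactive_aliases.items(): if lowered.startswith(alias + " "): …`
-- (text[len(prefix):] with a nonnegative index is List.drop, cf. PySem.List.slice_from_natCast)
def aliasLoopA : List (List Char × List Char) → List Char → List Char → Option (List Char)
  | [], _, _ => none
  | (aKey, target) :: restEntries, lowered, text =>
      let pre := aKey ++ [' ']
      if PySem.Chars.startswith lowered pre then
        let suffix := PySem.Chars.strip (List.drop pre.length text)
        some (pvCmdPrefix ++ PySem.Chars.strip (target ++ [' '] ++ suffix))
      else aliasLoopA restEntries lowered text

-- A's literal subcommand set
def voxenSubcmdsA : PySem.Set (List Char) := PySem.Set.ofList [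
  "plan".toList, "brainstorm".toList, "create".toList, "debug".toList, "enhance".toList,
  "preview".toList, "orchestrate".toList, "test".toList, "deploy".toList, "ui-ux-pro-max".toList,
  "discovery-to-delivery".toList, "workflow".toList, "status".toList, "skills".toList, "list".toList,
  "context".toList, "route".toList, "workflows".toList, "specialists".toList, "bundle".toList,
  "eval".toList, "profiles".toList]

-- A's remaining branches (after the alias handling), extracted as a helper
def voxenTailA (text : List Char) : List Char :=
  if PySem.Chars.startswith text "/voxen ".toList || text = "/voxen".toList then text
  else if PySem.Chars.startswith text ['/'] then "/voxen ".toList ++ List.drop 1 text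
  else
    match PySem.Chars.split₀Max text 1 with
    | p0 :: _ => if PySem.Set.contains voxenSubcmdsA (PySem.Chars.lower p0) then "/voxen ".toList ++ text else text
    | [] => text

-- A on char lists; `(raw or "").strip()` is `raw.strip()`
def normalizeACh (tokens : List (List Char)) (raw : List Char) : List Char :=
  let text := PySem.Chars.strip raw
  if text ≠ [] then
    let lowered := PySem.Chars.lower text
    match PySem.Dict.get? voxenAliasesA lowered with
    | some target => pvCmdPrefix ++ target
    | none =>
      match aliasLoopA voxenAliasesA.items lowered text with
      | some r => r
      | none => voxenTailA text
  else
    let joined := PySem.Chars.strip (PySem.Chars.join [' '] tokens)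
    if joined = [] then [] else normalizeACh [] joined
termination_by (if PySem.Chars.strip raw = [] then 1 else 0 : Nat)
decreasing_by
  have h1 : PySem.Chars.strip raw = [] := by
    by_contra hc
    exact absurd (show ¬PySem.Chars.strip raw ≠ [] from by assumption) (by simpa using hc)
  have h2 : PySem.Chars.strip (PySem.Chars.join [' '] tokens) ≠ [] := by assumption
  simp only [pvStrip_strip]
  rw [if_neg h2, if_pos h1]
  omega

def normalize_direct_input_py (tokens : List String) (raw : String) : String :=
  String.ofList (normalizeACh (tokens.map String.toList) raw.toList)

-- ===== PORT B =====
-- B's _SUBCOMMANDS list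
def pvSubNamesB : List (List Char) := [
  "plan".toList, "brainstorm".toList, "create".toList, "debug".toList, "enhance".toList,
  "preview".toList, "orchestrate".toList, "test".toList, "deploy".toList, "status".toList,
  "ui-ux-pro-max".toList, "discovery-to-delivery".toList]

-- B's _ALIASES dict, built by the module-level loop over _SUBCOMMANDS
def voxenAliasesB : PySem.Dict (List Char) (List Char) :=
  pvSubNamesB.foldl (fun d name =>
    let full := "/voxen ".toList ++ name
    (d.insert ("/voxen-".toList ++ name) full).insert ("voxen-".toList ++ name) full)
    PySem.Dict.empty

-- B's _KNOWN = set(_SUBCOMMANDS + [...])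
def voxenKnownB : PySem.Set (List Char) := PySem.Set.ofList (pvSubNamesB ++ [
  "workflow".toList, "skills".toList, "list".toList, "context".toList, "route".toList,
  "workflows".toList, "specialists".toList, "bundle".toList, "eval".toList, "profiles".toList])

-- str.partition(sep) for a nonempty sep, ported by hand (PySem has no partition); exact:
-- Chars.find gives the first occurrence of sep, or -1 when absent — exactly CPython's partition
def charsPartition (s : List Char) (sep : List Char) : List Char × List Char × List Char :=
  let i := PySem.Chars.find s sep
  if i < 0 then (s, [], [])
  else (List.take i.toNat s, sep, List.drop (i.toNat + sep.length) s)

-- B's remaining branches (identical in the two Pythons, but on B's _KNOWN set)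
def voxenTailB (text : List Char) : List Char :=
  if PySem.Chars.startswith text "/voxen ".toList || text = "/voxen".toList then text
  else if PySem.Chars.startswith text ['/'] then "/voxen ".toList ++ List.drop 1 text
  else
    match PySem.Chars.split₀Max text 1 with
    | p0 :: _ => if PySem.Set.contains voxenKnownB (PySem.Chars.lower p0) then "/voxen ".toList ++ text else text
    | [] => text

-- B's _norm helper
def normBCore (text : List Char) : List Char :=
  let p := charsPartition text [' ']
  match PySem.Dict.get? voxenAliasesB (PySem.Chars.lower p.1) with
  | some target =>
      let suffix := PySem.Chars.strip p.2.2
      pvCmdPrefix ++ PySem.Chars.strip (target ++ [' '] ++ suffix)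
  | none => voxenTailB text

def normalizeBCh (tokens : List (List Char)) (raw : List Char) : List Char :=
  let text := PySem.Chars.strip raw
  if text ≠ [] then normBCore text
  else
    let joined := PySem.Chars.strip (PySem.Chars.join [' '] tokens)
    if joined ≠ [] then normBCore joined else []

def normalize_direct_input_py_alt (tokens : List String) (raw : String) : String :=
  String.ofList (normalizeBCh (tokens.map String.toList) raw.toList)

-- ===== PRECONDITION & SPEC =====
def Spec_normalize_direct_input_py (tokens : List String) (raw : String) (out : String) : Prop := out = normalize_direct_input_py_alt tokens raw
instance (tokens : List String) (raw : String) (out : String) : Decidable (Spec_normalize_direct_input_py tokens raw out) := by unfold Spec_normalize_direct_input_py; infer_instance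

-- ===== CLAIM (what is proved, stated in full; the proofs are below) =====
def Claim_equal_normalize_direct_input_py : Prop := ∀ (tokens : List String) (raw : String), Dom_normalize_direct_input_py tokens raw → Spec_normalize_direct_input_py tokens raw (normalize_direct_input_py tokens raw)

-- ===== LEMMAS AND PROOFS =====

theorem pvLowerChar_space (c : Char) : PySem.Chars.lowerChar c = ' ' ↔ c = ' ' := by
  unfold PySem.Chars.lowerChar
  split_ifs with h
  · unfold PySem.Chars.isupper at h
    simp only [Bool.and_eq_true, decide_eq_true_eq, Char.le_def, UInt32.le_iff_toNat_le] at h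
    have hA : (65:Nat) ≤ c.toNat := h.1
    have hZ : c.toNat ≤ 90 := h.2
    constructor
    · intro hc
      have h2 := congrArg Char.toNat hc
      rw [Char.toNat_ofNat, if_pos (Or.inl (by omega))] at h2
      have h3 : (' ':Char).toNat = 32 := rfl
      omega
    · intro hc
      subst hc
      exact absurd hA (by decide)
  · simp

theorem pvSpace_mem_lower (s : List Char) : ' ' ∈ PySem.Chars.lower s ↔ ' ' ∈ s := by
  unfold PySem.Chars.lower
  rw [List.mem_map]
  constructor
  · rintro ⟨c, hc, hlc⟩
    rwa [(pvLowerChar_space c).1 hlc] at hc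
  · intro hc
    exact ⟨' ', hc, (pvLowerChar_space ' ').2 rfl⟩

-- the two alias dicts are the same association list
theorem pvDictB_eq : voxenAliasesB = voxenAliasesA := by decide

theorem pvKeysA_nospace : ∀ p ∈ voxenAliasesA.items, ' ' ∉ p.1 := by decide

theorem pvValuesA_strip : ∀ p ∈ voxenAliasesA.items, PySem.Chars.strip (p.2 ++ [' ']) = p.2 := by decide

-- the two subcommand sets have the same members
theorem pvContains_eq (x : List Char) :
    PySem.Set.contains voxenSubcmdsA x = PySem.Set.contains voxenKnownB x := by
  have hA : PySem.Set.contains voxenSubcmdsA x = true ↔ x ∈ voxenSubcmdsA := PySem.Set.contains_iff _ _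
  have hB : PySem.Set.contains voxenKnownB x = true ↔ x ∈ voxenKnownB := PySem.Set.contains_iff _ _
  have hmem : x ∈ voxenSubcmdsA ↔ x ∈ voxenKnownB := by
    unfold voxenSubcmdsA voxenKnownB
    rw [PySem.Set.mem_ofList, PySem.Set.mem_ofList]
    exact List.Perm.mem_iff (by decide)
  rw [Bool.eq_iff_iff, hA, hB]
  exact hmem

theorem pvTail_eq (text : List Char) : voxenTailA text = voxenTailB text := by
  unfold voxenTailA voxenTailB
  simp only [pvContains_eq]

theorem pvGet?_none_of_space {d : PySem.Dict (List Char) (List Char)} {k : List Char}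
    (hk : ' ' ∈ k) (hd : ∀ p ∈ d.items, ' ' ∉ p.1) : PySem.Dict.get? d k = none := by
  unfold PySem.Dict.get?
  rw [List.find?_eq_none.2, Option.map_none]
  intro p hp
  simp only [beq_iff_eq]
  intro hpk
  exact hd p hp (hpk ▸ hk)

theorem pvLoop_none {entries : List (List Char × List Char)} {lowered text : List Char}
    (h : ' ' ∉ lowered) : aliasLoopA entries lowered text = none := by
  induction entries with
  | nil => rfl
  | cons p tl ih =>
    obtain ⟨aKey, target⟩ := p
    rw [aliasLoopA, if_neg, ih]
    intro hs
    unfold PySem.Chars.startswith at hs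
    have hpre : aKey ++ [' '] <+: lowered := List.isPrefixOf_iff_prefix.1 hs
    exact h (hpre.subset (by simp))

theorem pvPrefix_space {a b r : List Char} (ha : ' ' ∉ a) (hb : ' ' ∉ b) :
    a ++ [' '] <+: b ++ ' ' :: r ↔ a = b := by
  constructor
  · intro h
    induction a generalizing b with
    | nil =>
      rcases b with _ | ⟨y, ys⟩
      · rfl
      · simp only [List.nil_append, List.cons_append, List.cons_prefix_cons] at h
        exact absurd (h.1 ▸ List.mem_cons_self) hb
    | cons x xs ih =>
      rcases b with _ | ⟨y, ys⟩
      · simp only [List.cons_append, List.nil_append, List.cons_prefix_cons] at h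
        exact absurd (h.1 ▸ List.mem_cons_self) ha
      · simp only [List.cons_append, List.cons_prefix_cons] at h
        have := ih (fun hx => ha (List.mem_cons_of_mem _ hx)) (fun hy => hb (List.mem_cons_of_mem _ hy)) h.2
        rw [h.1, this]
  · rintro rfl
    exact ⟨r, by simp⟩

theorem pvLoop_eq_find? (entries : List (List Char × List Char)) (head rest : List Char)
    (hh : ' ' ∉ head) (hkeys : ∀ p ∈ entries, ' ' ∉ p.1) :
    aliasLoopA entries (PySem.Chars.lower (head ++ ' ' :: rest)) (head ++ ' ' :: rest) =
      (entries.find? (fun p => p.1 == PySem.Chars.lower head)).map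
        (fun p => pvCmdPrefix ++ PySem.Chars.strip (p.2 ++ [' '] ++ PySem.Chars.strip rest)) := by
  have hlow : PySem.Chars.lower (head ++ ' ' :: rest) = PySem.Chars.lower head ++ ' ' :: PySem.Chars.lower rest := by
    unfold PySem.Chars.lower
    simp
    decide
  have hhl : ' ' ∉ PySem.Chars.lower head := fun hx => hh ((pvSpace_mem_lower head).1 hx)
  induction entries with
  | nil => rfl
  | cons p tl ih =>
    obtain ⟨aKey, target⟩ := p
    have hks : ' ' ∉ aKey := hkeys (aKey, target) List.mem_cons_self
    rw [aliasLoopA, List.find?_cons]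
    by_cases hk : aKey = PySem.Chars.lower head
    · have hsw : PySem.Chars.startswith (PySem.Chars.lower (head ++ ' ' :: rest)) (aKey ++ [' ']) = true := by
        unfold PySem.Chars.startswith
        rw [List.isPrefixOf_iff_prefix, hlow]
        exact (pvPrefix_space hks hhl).2 hk
      have hbeq : ((aKey, target).1 == PySem.Chars.lower head) = true := beq_iff_eq.2 hk
      rw [if_pos hsw, hbeq]
      have hlen : (aKey ++ [' ']).length = head.length + 1 := by
        simp [hk, PySem.Chars.lower]
      have hdrop : List.drop (aKey ++ [' ']).length (head ++ ' ' :: rest) = rest := by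
        rw [hlen]
        have hsplit : head ++ ' ' :: rest = (head ++ [' ']) ++ rest := by simp
        rw [hsplit, List.drop_left' (by simp)]
      simp only [hdrop, Option.map_some]
    · have hsw : PySem.Chars.startswith (PySem.Chars.lower (head ++ ' ' :: rest)) (aKey ++ [' ']) = false := by
        unfold PySem.Chars.startswith
        rw [← Bool.not_eq_true, List.isPrefixOf_iff_prefix, hlow]
        intro hpre
        exact hk ((pvPrefix_space hks hhl).1 hpre)
      have hbeq : ((aKey, target).1 == PySem.Chars.lower head) = false := beq_eq_false_iff_ne.2 hk
      rw [if_neg (by rw [hsw]; exact Bool.false_ne_true), hbeq]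
      exact ih (fun q hq => hkeys q (List.mem_cons_of_mem _ hq))

theorem pvCore_eq (text : List Char) :
    (match PySem.Dict.get? voxenAliasesA (PySem.Chars.lower text) with
     | some target => pvCmdPrefix ++ target
     | none =>
       match aliasLoopA voxenAliasesA.items (PySem.Chars.lower text) text with
       | some r => r
       | none => voxenTailA text) = normBCore text := by
  unfold normBCore charsPartition
  by_cases hmem : ' ' ∈ text
  · -- text contains a space: A's exact-match lookup fails, the scan and B's keyed lookup agree
    have hi : 0 ≤ PySem.Chars.find text [' '] := (PySem.Chars.find_nonneg_iff _ _).2 ((List.singleton_infix_iff _ _).2 hmem)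
    obtain ⟨hpref, hmin⟩ := PySem.Chars.find_spec hi
    set n := (PySem.Chars.find text [' ']).toNat with hn
    have hlt : ¬ PySem.Chars.find text [' '] < 0 := by omega
    have hnlen : n < text.length := by
      by_contra hc
      rw [List.drop_eq_nil_of_le (by omega)] at hpref
      obtain ⟨u, hu⟩ := hpref
      simp at hu
    have hdropn : List.drop n text = ' ' :: List.drop (n + 1) text := by
      obtain ⟨u, hu⟩ := hpref
      rw [List.drop_eq_getElem_cons hnlen] at hu ⊢
      simp only [List.singleton_append, List.cons_eq_cons] at hu
      rw [← hu.1]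
    have htext : text = List.take n text ++ ' ' :: List.drop (n + 1) text := by
      conv_lhs => rw [← List.take_append_drop n text]
      rw [hdropn]
    have hheadns : ' ' ∉ List.take n text := by
      intro hx
      obtain ⟨j, hj, hget⟩ := List.mem_iff_getElem.1 hx
      have hjn : j < n := by
        have := hj
        simp only [List.length_take] at this
        omega
      have hgt : text[j]'(by omega) = ' ' := by
        rw [List.getElem_take] at hget
        exact hget
      refine hmin j hjn ?_
      rw [List.drop_eq_getElem_cons (show j < text.length by omega), hgt]
      exact ⟨_, rfl⟩
    have hspacelow : ' ' ∈ PySem.Chars.lower text := (pvSpace_mem_lower text).2 hmem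
    rw [pvGet?_none_of_space hspacelow pvKeysA_nospace]
    conv_lhs => rw [htext]
    rw [pvLoop_eq_find? _ _ _ hheadns pvKeysA_nospace]
    rw [pvDictB_eq]
    simp only [if_neg hlt]
    show _ = (match PySem.Dict.get? voxenAliasesA (PySem.Chars.lower (List.take n text)) with
      | some target => pvCmdPrefix ++ PySem.Chars.strip (target ++ [' '] ++ PySem.Chars.strip (List.drop (n + 1) text))
      | none => voxenTailB text)
    unfold PySem.Dict.get?
    cases hf : List.find? (fun p => p.1 == PySem.Chars.lower (List.take n text)) voxenAliasesA.items with
    | none => simp only [Option.map_none]; rw [← htext]; exact pvTail_eq text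
    | some p => simp only [Option.map_some]
  · -- no space: A's exact-match lookup is B's lookup; the scan finds nothing
    have hfind : PySem.Chars.find text [' '] = -1 := by
      rw [PySem.Chars.find_eq_neg_one_iff]
      rw [List.singleton_infix_iff]
      exact hmem
    rw [pvDictB_eq]
    simp only [hfind, if_pos (by norm_num : (-1:Int) < 0)]
    cases hg : PySem.Dict.get? voxenAliasesA (PySem.Chars.lower text) with
    | some t =>
      have hmemitems : ∃ p ∈ voxenAliasesA.items, p.2 = t := by
        unfold PySem.Dict.get? at hg
        cases hf : List.find? (fun p => p.1 == PySem.Chars.lower text) voxenAliasesA.items with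
        | none => rw [hf] at hg; simp at hg
        | some p =>
          rw [hf] at hg
          simp at hg
          exact ⟨p, List.mem_of_find?_eq_some hf, hg⟩
      obtain ⟨p, hp, hpt⟩ := hmemitems
      have hstrip : PySem.Chars.strip (t ++ [' ']) = t := hpt ▸ pvValuesA_strip p hp
      show pvCmdPrefix ++ t = pvCmdPrefix ++ PySem.Chars.strip (t ++ [' '] ++ PySem.Chars.strip [])
      rw [show PySem.Chars.strip ([] : List Char) = [] from rfl, List.append_nil, hstrip]
    | none =>
      rw [pvLoop_none (fun hx => hmem ((pvSpace_mem_lower text).1 hx))]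
      exact pvTail_eq text

theorem pvNorm_eq (tokens : List (List Char)) (raw : List Char) :
    normalizeACh tokens raw = normalizeBCh tokens raw := by
  rw [normalizeACh, normalizeBCh]
  by_cases hs : PySem.Chars.strip raw = []
  · simp only [hs, ne_eq, not_true_eq_false, if_false]
    by_cases hj : PySem.Chars.strip (PySem.Chars.join [' '] tokens) = []
    · simp [hj]
    · simp only [hj]
      rw [normalizeACh]
      simp only [pvStrip_strip]
      simp only [if_pos (show PySem.Chars.strip (PySem.Chars.join [' '] tokens) ≠ [] from hj)]
      exact pvCore_eq _
  · simp only [if_pos (show PySem.Chars.strip raw ≠ [] from hs)]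
    exact pvCore_eq _

-- ===== VERDICT (by name: the statement is the Claim_ definition above) =====
theorem normalize_direct_input_py_spec : Claim_equal_normalize_direct_input_py := by
  intro tokens raw _
  unfold Spec_normalize_direct_input_py normalize_direct_input_py normalize_direct_input_py_alt
  rw [pvNorm_eq]
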